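-- pv_equiv track=rewrite | github.com/dimostzim/covid-scfv-publication | scripts/specificity/common.py | _kmer_index
-- ===== SOURCE A (Python) =====
-- DNA_MAP = {
--     "A": 0,
--     "C": 1,
--     "G": 2,
--     "T": 3,
-- }
--
-- def _kmer_index(kmer: str) -> int | None:
--     idx = 0
--     for c in kmer:
--         v = DNA_MAP.get(c)
--         if v is None:
--             return None
--         idx = (idx << 2) | v
--     return idx
-- ===== SOURCE B (Python) =====
-- DNA_MAP = {
--     "A": 0,
--     "C": 1,
--     "G": 2,
--     "T": 3,
-- }
--
-- def _kmer_index(kmer: str) -> int | None: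
--     # pass 1: validate; pass 2: positional base-4 sum over the reversed string
--     if any(c not in DNA_MAP for c in kmer):
--         return None
--     return sum(DNA_MAP[c] * (4 ** i) for i, c in enumerate(reversed(kmer)))
-- ===== Notes on version B (the rewrite author's own statement) =====
-- stated objective: alternative
-- what changed: Replaces the fused left-to-right shift-or accumulation with a separate validation pass followed by a right-to-left positional base-4 weighted sum.
import Mathlib
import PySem

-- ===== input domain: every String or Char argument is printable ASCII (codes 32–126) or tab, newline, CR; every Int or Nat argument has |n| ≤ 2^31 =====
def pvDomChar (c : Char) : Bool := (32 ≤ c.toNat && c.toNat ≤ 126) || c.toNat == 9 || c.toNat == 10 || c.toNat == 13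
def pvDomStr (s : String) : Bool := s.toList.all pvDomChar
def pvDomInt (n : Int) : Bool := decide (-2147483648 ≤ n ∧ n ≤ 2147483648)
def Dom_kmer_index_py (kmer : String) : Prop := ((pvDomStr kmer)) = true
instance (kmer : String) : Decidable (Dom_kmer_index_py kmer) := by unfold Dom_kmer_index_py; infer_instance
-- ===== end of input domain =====

-- B replaces A's fused shift-or accumulation by a validation pass plus a reversed positional base-4 sum (alternative decomposition, same cost).

-- ===== PORT A =====
-- DNA_MAP = {"A": 0, "C": 1, "G": 2, "T": 3}
def pvDNA : PySem.Dict String Int :=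
  PySem.Dict.ofList [("A", 0), ("C", 1), ("G", 2), ("T", 3)]

-- the 'for c in kmer' loop, state = idx
def kmer_index_py_go (idx : Int) : List Char → Option Int
  | [] => some idx
  | c :: cs =>
    match PySem.Dict.get? pvDNA (String.ofList [c]) with
    | none => none
    | some v => kmer_index_py_go (PySem.Int.bor (idx <<< (2:Nat)) v) cs

def kmer_index_py (kmer : String) : Option Int :=
  kmer_index_py_go 0 kmer.toList

-- ===== PORT B =====
-- 'if any(c not in DNA_MAP for c in kmer): return None', then
-- 'sum(DNA_MAP[c] * (4 ** i) for i, c in enumerate(reversed(kmer)))'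
-- (4 ** i with the enumerate index i ≥ 0: exponent taken as a Nat)
def kmer_index_py_alt (kmer : String) : Option Int :=
  if kmer.toList.any (fun c => !(PySem.Dict.contains pvDNA (String.ofList [c]))) then none
  else
    some (((PySem.List.enumerate kmer.toList.reverse 0).map
      (fun p => PySem.Dict.getD pvDNA (String.ofList [p.2]) 0 * 4 ^ p.1.toNat)).sum)

-- ===== PRECONDITION & SPEC =====
def Spec_kmer_index_py (kmer : String) (out : Option Int) : Prop := out = kmer_index_py_alt kmer
instance (kmer : String) (out : Option Int) : Decidable (Spec_kmer_index_py kmer out) := by unfold Spec_kmer_index_py; infer_instance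

-- ===== CLAIM (what is proved, stated in full; the proofs are below) =====
def Claim_equal_kmer_index_py : Prop := ∀ (kmer : String), Dom_kmer_index_py kmer → Spec_kmer_index_py kmer (kmer_index_py kmer)

-- ===== LEMMAS AND PROOFS =====

-- any lookup in the literal dict is none or one of 0,1,2,3
theorem pvDNA_cases (s : String) :
    PySem.Dict.get? pvDNA s = none ∨ PySem.Dict.get? pvDNA s = some 0 ∨
    PySem.Dict.get? pvDNA s = some 1 ∨ PySem.Dict.get? pvDNA s = some 2 ∨
    PySem.Dict.get? pvDNA s = some 3 := by
  by_cases hA : s = "A"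
  · subst hA; right; left; decide
  by_cases hC : s = "C"
  · subst hC; right; right; left; decide
  by_cases hG : s = "G"
  · subst hG; right; right; right; left; decide
  by_cases hT : s = "T"
  · subst hT; right; right; right; right; decide
  · left
    have : pvDNA =
        ((((PySem.Dict.empty.insert "A" (0:Int)).insert "C" 1).insert "G" 2).insert "T" 3) := by
      decide
    rw [this]
    simp [PySem.Dict.get?_insert, hA, hC, hG, hT]

theorem step_arith (idx v : Int) (h : 0 ≤ idx) (hv0 : 0 ≤ v) (hv : v < 4) :
    PySem.Int.bor (idx <<< (2:Nat)) v = 4 * idx + v := by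
  have hsh : idx <<< (2:Nat) = 4 * idx := by
    rw [Int.shiftLeft_eq]; ring
  rw [hsh, PySem.Int.bor_of_nonneg (by omega) hv0]
  have h4 : (4 * idx).toNat = 4 * idx.toNat := by omega
  have hor : 4 * idx.toNat ||| v.toNat = 4 * idx.toNat + v.toNat := by
    have h2 := (Nat.shiftLeft_add_eq_or_of_lt (a := idx.toNat)
      (by omega : v.toNat < 2 ^ 2)).symm
    simpa [Nat.shiftLeft_eq, Nat.mul_comm] using h2
  rw [h4, hor]
  omega

-- characterisation of A's loop
theorem go_eq (cs : List Char) (idx : Int) (h : 0 ≤ idx) :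
    kmer_index_py_go idx cs =
      if cs.any (fun c => !(PySem.Dict.contains pvDNA (String.ofList [c]))) then none
      else some (cs.foldl (fun a c => 4 * a + PySem.Dict.getD pvDNA (String.ofList [c]) 0) idx) := by
  induction cs generalizing idx with
  | nil => simp [kmer_index_py_go]
  | cons c cs ih =>
    rcases pvDNA_cases (String.ofList [c]) with hn | hv | hv | hv | hv
    · have hc : PySem.Dict.contains pvDNA (String.ofList [c]) = false := by
        rw [← PySem.Dict.get?_eq_none_iff_contains]; exact hn
      simp [kmer_index_py_go, hn, hc]
    all_goals {
      have hc : PySem.Dict.contains pvDNA (String.ofList [c]) = true := by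
        cases hcc : PySem.Dict.contains pvDNA (String.ofList [c]) with
        | true => rfl
        | false =>
          have hnone := (PySem.Dict.get?_eq_none_iff_contains pvDNA (String.ofList [c])).mpr hcc
          rw [hv] at hnone
          exact absurd hnone (by simp)
      have hd : PySem.Dict.getD pvDNA (String.ofList [c]) 0 = (PySem.Dict.get? pvDNA (String.ofList [c])).getD 0 := by
        simp [PySem.Dict.getD]
      simp only [kmer_index_py_go, hv, hc, List.any_cons, Bool.not_true, Bool.false_or,
        List.foldl_cons]
      rw [step_arith idx _ h (by norm_num) (by norm_num), ih _ (by omega)]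
      rw [hv] at hd
      simp [hd]
    }

-- the reversed positional sum, with the start index shifted by one
theorem sum_shift (xs : List Char) (s : Nat) :
    ((PySem.List.enumerate xs ((s : Int) + 1)).map
        (fun p => PySem.Dict.getD pvDNA (String.ofList [p.2]) 0 * 4 ^ p.1.toNat)).sum =
      4 * ((PySem.List.enumerate xs (s : Int)).map
        (fun p => PySem.Dict.getD pvDNA (String.ofList [p.2]) 0 * 4 ^ p.1.toNat)).sum := by
  induction xs generalizing s with
  | nil => simp [PySem.List.enumerate_nil]
  | cons x xs ih =>
    have h1 : ((s : Int) + 1) = ((s + 1 : Nat) : Int) := by push_cast; ring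
    have h2 : ((s : Int) + 1 + 1) = ((s + 1 : Nat) : Int) + 1 := by push_cast; ring
    simp only [PySem.List.enumerate_cons, List.map_cons, List.sum_cons, ih (s + 1), h1]
    have h3 : (((s + 1 : Nat) : Int)).toNat = s + 1 := by omega
    have h4 : ((s : Int)).toNat = s := by omega
    rw [h3, h4]
    ring

-- A's horner fold equals B's reversed positional sum
theorem fold_eq_sum (cs : List Char) :
    cs.foldl (fun a c => 4 * a + PySem.Dict.getD pvDNA (String.ofList [c]) 0) 0 =
      ((PySem.List.enumerate cs.reverse 0).map
        (fun p => PySem.Dict.getD pvDNA (String.ofList [p.2]) 0 * 4 ^ p.1.toNat)).sum := by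
  induction cs using List.reverseRecOn with
  | nil => simp [PySem.List.enumerate_nil]
  | append_singleton ds c ih =>
    rw [List.foldl_append]
    have h0 : ((0 : Int) + 1) = ((0 : Nat) : Int) + 1 := by norm_num
    simp only [List.reverse_append, List.reverse_singleton, List.singleton_append,
      PySem.List.enumerate_cons, List.map_cons, List.sum_cons, List.foldl_cons]
    rw [h0, sum_shift ds.reverse 0]
    simp only [Nat.cast_zero]
    rw [← ih]
    simp only [List.foldl, Int.toNat_zero, pow_zero, mul_one]
    ring

-- ===== VERDICT (by name: the statement is the Claim_ definition above) =====
theorem kmer_index_py_spec : Claim_equal_kmer_index_py := by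
  intro kmer _
  unfold Spec_kmer_index_py kmer_index_py kmer_index_py_alt
  rw [go_eq kmer.toList 0 le_rfl, fold_eq_sum]
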